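-- pv_equiv track=rewrite | github.com/team-november/million-plant-map | python scrapers/FOGBIVolume4Scrape.py | get_first_two
-- ===== SOURCE A (Python) =====
-- def get_first_two(text):
--     result = ''
--     flag = 0
--     for c in text:
--         if c == ' ':
--             flag += 1
--             if flag == 3:
--                 return result
--             else:
--                 result += c
--         else:
--             result += c
--
--     return result
-- ===== SOURCE B (Python) =====
-- def get_first_two(text):
--     return ' '.join(text.split(' ', 3)[:3])
-- ===== Notes on version B (the rewrite author's own statement) =====
-- stated objective: idiomatic
-- what changed: Replaces the char-by-char loop that counts spaces in a mutable flag with a one-liner: split on the space separator with maxsplit 3, keep the first three tokens, rejoin with single spaces.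
import Mathlib
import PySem

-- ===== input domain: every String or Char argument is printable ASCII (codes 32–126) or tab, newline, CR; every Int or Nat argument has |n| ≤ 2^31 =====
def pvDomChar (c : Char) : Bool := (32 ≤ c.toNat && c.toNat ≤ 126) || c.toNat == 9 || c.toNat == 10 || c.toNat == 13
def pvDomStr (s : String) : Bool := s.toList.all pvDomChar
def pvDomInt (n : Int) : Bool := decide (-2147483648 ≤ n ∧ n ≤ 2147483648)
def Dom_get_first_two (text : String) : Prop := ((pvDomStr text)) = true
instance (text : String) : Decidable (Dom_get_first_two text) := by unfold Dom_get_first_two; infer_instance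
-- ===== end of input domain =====

-- B replaces A's char-by-char space-counting loop with split(' ', 3)[:3] rejoined — more idiomatic; a timing run measured it faster (C-level split vs per-char Python loop).


-- ===== PORT A =====
-- the for-loop with its early return, char by char; result : String, flag : Int as in A
def getFirstTwoLoop : List Char → String → Int → String
  | [], result, _ => result
  | c :: rest, result, flag =>
    if c = ' ' then
      if flag + 1 = 3 then result
      else getFirstTwoLoop rest (result.push c) (flag + 1)
    else getFirstTwoLoop rest (result.push c) flag

def get_first_two (text : String) : String := getFirstTwoLoop text.toList "" 0

-- ===== PORT B =====
-- ' '.join(text.split(' ', 3)[:3])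
def get_first_two_alt (text : String) : String :=
  PySem.Str.join " " (((PySem.Str.splitMax? text " " 3).getD []).take 3)

-- ===== PRECONDITION & SPEC =====
def Spec_get_first_two (text : String) (out : String) : Prop := out = get_first_two_alt text
instance (text : String) (out : String) : Decidable (Spec_get_first_two text out) := by unfold Spec_get_first_two; infer_instance

-- ===== CLAIM (what is proved, stated in full; the proofs are below) =====
def Claim_equal_get_first_two : Prop := ∀ (text : String), Dom_get_first_two text → Spec_get_first_two text (get_first_two text)

-- ===== LEMMAS AND PROOFS =====

-- common reference function: the characters of `l` up to (excluding) the m-th space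
def takeToSpace : List Char → Nat → List Char
  | [], _ => []
  | c :: rest, m =>
    if c = ' ' then (if m = 1 then [] else c :: takeToSpace rest (m - 1))
    else c :: takeToSpace rest m

theorem push_append_ofList (s : String) (c : Char) (t : List Char) :
    (s.push c) ++ String.ofList t = s ++ String.ofList (c :: t) := by
  apply String.toList_inj.mp; simp

theorem loopA_eq (l : List Char) (res : String) (m : Nat) (h1 : 1 ≤ m) (h3 : m ≤ 3) :
    getFirstTwoLoop l res (3 - (m : Int)) = res ++ String.ofList (takeToSpace l m) := by
  induction l generalizing res m with
  | nil => simp [getFirstTwoLoop, takeToSpace]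
  | cons c rest ih =>
    by_cases hc : c = ' '
    · subst hc
      by_cases hm : m = 1
      · subst hm; simp [getFirstTwoLoop, takeToSpace]
      · have hm2 : 2 ≤ m := by omega
        have : (3 : Int) - (m : Int) + 1 ≠ 3 := by omega
        simp only [getFirstTwoLoop, takeToSpace, if_neg this, if_neg hm]
        have : (3 : Int) - (m : Int) + 1 = 3 - ((m - 1 : Nat) : Int) := by omega
        rw [this, ih (res.push ' ') (m - 1) (by omega) (by omega)]
        exact push_append_ofList res ' ' (takeToSpace rest (m - 1))
    · simp only [getFirstTwoLoop, takeToSpace, if_neg hc]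
      rw [ih (res.push c) m h1 h3]
      exact push_append_ofList res c (takeToSpace rest m)

theorem go_acc (sep : List Char) (fuel : Nat) (m : Nat) (l cur : List Char)
    (acc : List (List Char)) :
    PySem.Chars.splitOnMax.go sep fuel m l cur acc
      = acc.reverse ++ PySem.Chars.splitOnMax.go sep fuel m l cur [] := by
  induction fuel generalizing m l cur acc with
  | zero => simp [PySem.Chars.splitOnMax.go]
  | succ fuel ih =>
    cases l with
    | nil => simp [PySem.Chars.splitOnMax.go]
    | cons c rest =>
      by_cases hm : m = 0
      · simp [PySem.Chars.splitOnMax.go, hm]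
      · by_cases hp : sep.isPrefixOf (c :: rest) = true
        · simp only [PySem.Chars.splitOnMax.go, if_neg hm, if_pos hp]
          rw [ih (m - 1) _ [] (cur.reverse :: acc), ih (m - 1) _ [] [cur.reverse]]
          simp
        · simp only [PySem.Chars.splitOnMax.go, if_neg hm, hp, Bool.false_eq_true, if_false]
          exact ih m rest (c :: cur) acc

theorem go_ne_nil (sep : List Char) (fuel : Nat) (m : Nat) (l cur : List Char)
    (acc : List (List Char)) :
    PySem.Chars.splitOnMax.go sep fuel m l cur acc ≠ [] := by
  induction fuel generalizing m l cur acc with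
  | zero => simp [PySem.Chars.splitOnMax.go]
  | succ fuel ih =>
    cases l with
    | nil => simp [PySem.Chars.splitOnMax.go]
    | cons c rest =>
      by_cases hm : m = 0
      · simp [PySem.Chars.splitOnMax.go, hm]
      · by_cases hp : sep.isPrefixOf (c :: rest) = true
        · simp only [PySem.Chars.splitOnMax.go, if_neg hm, if_pos hp]
          exact ih (m - 1) _ [] _
        · simp only [PySem.Chars.splitOnMax.go, if_neg hm, hp, Bool.false_eq_true, if_false]
          exact ih m rest (c :: cur) acc

theorem go_join (fuel : Nat) (m : Nat) (l cur : List Char)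
    (h1 : 1 ≤ m) (hf : l.length ≤ fuel) :
    PySem.Chars.join [' ']
        ((PySem.Chars.splitOnMax.go [' '] fuel m l cur []).take m)
      = cur.reverse ++ takeToSpace l m := by
  induction fuel generalizing m l cur with
  | zero =>
    have hl : l = [] := by cases l <;> simp_all
    subst hl
    have hg : PySem.Chars.splitOnMax.go [' '] 0 m [] cur [] = [cur.reverse] := by
      simp [PySem.Chars.splitOnMax.go]
    rw [hg, List.take_of_length_le (by simpa using h1)]
    simp [PySem.Chars.join_singleton, takeToSpace]
  | succ fuel ih =>
    cases l with
    | nil =>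
      have hg : PySem.Chars.splitOnMax.go [' '] (fuel + 1) m [] cur [] = [cur.reverse] := by
        simp [PySem.Chars.splitOnMax.go]
      rw [hg, List.take_of_length_le (by simpa using h1)]
      simp [PySem.Chars.join_singleton, takeToSpace]
    | cons c rest =>
      have hm0 : m ≠ 0 := by omega
      by_cases hc : c = ' '
      · subst hc
        have hp : [' '].isPrefixOf (' ' :: rest) = true := by simp [List.isPrefixOf]
        simp only [PySem.Chars.splitOnMax.go, if_neg hm0, if_pos hp]
        rw [go_acc]
        by_cases hm1 : m = 1
        · subst hm1
          -- take 1 keeps only cur.reverse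
          simp only [List.reverse_cons, List.reverse_nil, List.nil_append]
          rw [show ([cur.reverse] ++ PySem.Chars.splitOnMax.go [' '] fuel (1 - 1) (List.drop [' '].length (' ' :: rest)) [] []).take 1 = [cur.reverse] by simp]
          simp [PySem.Chars.join_singleton, takeToSpace]
        · have h2 : 2 ≤ m := by omega
          have hne := go_ne_nil [' '] fuel (m - 1) (List.drop [' '].length (' ' :: rest)) [] []
          simp only [List.reverse_cons, List.reverse_nil, List.nil_append]
          rw [show ([cur.reverse] ++ PySem.Chars.splitOnMax.go [' '] fuel (m - 1) (List.drop [' '].length (' ' :: rest)) [] []).take m = cur.reverse :: (PySem.Chars.splitOnMax.go [' '] fuel (m - 1) (List.drop [' '].length (' ' :: rest)) [] []).take (m - 1) by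
            cases m with
            | zero => omega
            | succ k => simp]
          have hih := ih (m - 1) (List.drop [' '].length (' ' :: rest)) [] (by omega) (by simpa using Nat.le_of_succ_le_succ (by simpa using hf))
          rcases hx : (PySem.Chars.splitOnMax.go [' '] fuel (m - 1) (List.drop [' '].length (' ' :: rest)) [] []).take (m - 1) with _ | ⟨p, ps⟩
          · -- take (m-1) nonempty since go nonempty and m-1 ≥ 1
            exfalso
            rcases hy : PySem.Chars.splitOnMax.go [' '] fuel (m - 1) (List.drop [' '].length (' ' :: rest)) [] [] with _ | ⟨q, qs⟩
            · exact hne hy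
            · rw [hy] at hx
              cases hm' : m - 1 with
              | zero => omega
              | succ k => rw [hm'] at hx; simp at hx
          · rw [hx] at hih
            rw [PySem.Chars.join_cons_cons]
            rw [hih]
            simp [takeToSpace, hm1]
      · have hp : [' '].isPrefixOf (c :: rest) = false := by
          simp only [List.isPrefixOf, Bool.and_true, beq_eq_false_iff_ne, ne_eq]
          exact fun h => hc h.symm
        simp only [PySem.Chars.splitOnMax.go, if_neg hm0, hp, Bool.false_eq_true, if_false]
        rw [ih m rest (c :: cur) h1 (by simpa using Nat.le_of_succ_le_succ (by simpa using hf))]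
        simp [takeToSpace, hc]

theorem alt_eq (text : String) :
    get_first_two_alt text = String.ofList (takeToSpace text.toList 3) := by
  have key := go_join (text.toList.length + 1) 3 text.toList [] (by omega) (by omega)
  simp only [List.reverse_nil, List.nil_append] at key
  apply String.toList_inj.mp
  unfold get_first_two_alt
  rw [PySem.Str.splitMax?]
  rw [show (" " : String).toList = [' '] from rfl]
  rw [PySem.Chars.splitMax?]
  simp only [List.isEmpty_cons, Bool.false_eq_true, if_false, Option.map_some, Option.getD_some]
  rw [PySem.Chars.splitOnMax, if_neg (by omega)]
  rw [show (3 : Int).toNat = 3 from rfl]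
  rw [← List.map_take]
  rw [← key]
  simp [PySem.Str.join, List.map_map]
  simp [Function.comp_def]

theorem a_eq (text : String) :
    get_first_two text = String.ofList (takeToSpace text.toList 3) := by
  unfold get_first_two
  have := loopA_eq text.toList "" 3 (by omega) (by omega)
  simpa using this

-- ===== VERDICT (by name: the statement is the Claim_ definition above) =====
theorem get_first_two_spec : Claim_equal_get_first_two := by
  intro text _
  unfold Spec_get_first_two
  rw [a_eq, alt_eq]
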